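-- pv_equiv track=rewrite | github.com/joelmarsden/aoc2024 | src/21_2.py | nav_v
-- ===== SOURCE A (Python) =====
-- def nav_v(start_row, end_row):
--     directions = []
--     while start_row > end_row:
--         directions.append("^")
--         start_row -= 1
--     while start_row < end_row:
--         directions.append("v")
--         start_row += 1
--     return directions
-- ===== SOURCE B (Python) =====
-- def nav_v(start_row, end_row):
--     d = start_row - end_row
--     if d > 0:
--         return ["^"] * d
--     if d < 0:
--         return ["v"] * (-d)
--     return []
-- ===== Notes on version B (the rewrite author's own statement) =====
-- stated objective: simpler
-- what changed: Replaces the two append-one-at-a-time while loops with a single closed-form computation: the signed row difference is taken once and the whole arrow list is materialized by list repetition.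
import Mathlib
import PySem

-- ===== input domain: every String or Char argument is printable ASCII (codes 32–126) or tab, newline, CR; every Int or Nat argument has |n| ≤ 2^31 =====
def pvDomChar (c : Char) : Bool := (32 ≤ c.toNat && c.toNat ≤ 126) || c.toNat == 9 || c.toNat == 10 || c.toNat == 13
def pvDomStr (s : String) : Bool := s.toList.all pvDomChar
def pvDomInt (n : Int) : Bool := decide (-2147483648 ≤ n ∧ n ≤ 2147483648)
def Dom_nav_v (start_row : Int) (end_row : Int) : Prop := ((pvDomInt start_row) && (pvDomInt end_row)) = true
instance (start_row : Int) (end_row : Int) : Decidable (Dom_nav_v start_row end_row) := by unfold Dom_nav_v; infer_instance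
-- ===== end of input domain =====

-- B: computes the signed row difference once and returns the arrow list by replication, instead of A's two append-per-step while loops (objective: simpler).


-- ===== PORT A =====
-- while start_row > end_row: append "^"; start_row -= 1  (threads updated start_row out)
def nav_v_up (start_row : Int) (end_row : Int) (directions : List String) : List String × Int :=
  if start_row > end_row then nav_v_up (start_row - 1) end_row (directions ++ ["^"])
  else (directions, start_row)
termination_by (start_row - end_row).toNat
decreasing_by omega

-- while start_row < end_row: append "v"; start_row += 1
def nav_v_down (start_row : Int) (end_row : Int) (directions : List String) : List String :=
  if start_row < end_row then nav_v_down (start_row + 1) end_row (directions ++ ["v"])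
  else directions
termination_by (end_row - start_row).toNat
decreasing_by omega

def nav_v (start_row : Int) (end_row : Int) : List String :=
  let p := nav_v_up start_row end_row []
  nav_v_down p.2 end_row p.1

-- ===== PORT B =====
def nav_v_alt (start_row : Int) (end_row : Int) : List String :=
  let d := start_row - end_row
  if d > 0 then List.replicate d.toNat "^"
  else if d < 0 then List.replicate (-d).toNat "v"
  else []

-- ===== PRECONDITION & SPEC =====
def Spec_nav_v (start_row : Int) (end_row : Int) (out : List String) : Prop := out = nav_v_alt start_row end_row
instance (start_row : Int) (end_row : Int) (out : List String) : Decidable (Spec_nav_v start_row end_row out) := by unfold Spec_nav_v; infer_instance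

-- ===== CLAIM (what is proved, stated in full; the proofs are below) =====
def Claim_equal_nav_v : Prop := ∀ (start_row : Int) (end_row : Int), Dom_nav_v start_row end_row → Spec_nav_v start_row end_row (nav_v start_row end_row)

-- ===== LEMMAS AND PROOFS =====

-- ===== VERDICT (by name: the statement is the Claim_ definition above) =====
lemma nav_v_up_eq (start_row end_row : Int) (acc : List String) :
    nav_v_up start_row end_row acc =
      (acc ++ List.replicate (start_row - end_row).toNat "^",
       if start_row > end_row then end_row else start_row) := by
  by_cases h : start_row > end_row
  · rw [nav_v_up]
    have := nav_v_up_eq (start_row - 1) end_row (acc ++ ["^"])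
    simp only [h, if_pos h, this]
    have h1 : (start_row - end_row).toNat = (start_row - 1 - end_row).toNat + 1 := by omega
    rw [h1, List.replicate_succ]
    by_cases h2 : start_row - 1 > end_row <;> simp [h2] <;> omega
  · rw [nav_v_up]; simp [h]; omega
termination_by (start_row - end_row).toNat
decreasing_by omega

lemma nav_v_down_eq (start_row end_row : Int) (acc : List String) :
    nav_v_down start_row end_row acc =
      acc ++ List.replicate (end_row - start_row).toNat "v" := by
  by_cases h : start_row < end_row
  · rw [nav_v_down]
    have := nav_v_down_eq (start_row + 1) end_row (acc ++ ["v"])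
    simp only [if_pos h, this]
    have h1 : (end_row - start_row).toNat = (end_row - (start_row + 1)).toNat + 1 := by omega
    rw [h1, List.replicate_succ]
    simp
  · rw [nav_v_down]; simp [h]; omega
termination_by (end_row - start_row).toNat
decreasing_by omega

theorem nav_v_spec : Claim_equal_nav_v := by
  intro s e _
  unfold Spec_nav_v nav_v nav_v_alt
  rw [nav_v_up_eq]
  by_cases h : s > e
  · rw [if_pos h, nav_v_down_eq]
    have h0 : (e - e).toNat = 0 := by omega
    rw [h0, if_pos (by omega : s - e > 0)]
    simp
  · rw [if_neg h, nav_v_down_eq, if_neg (by omega : ¬ s - e > 0)]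
    by_cases h2 : s - e < 0
    · rw [if_pos h2, List.nil_append]
      have h4 : (e - s).toNat = (-(s - e)).toNat := by omega
      have h5 : (s - e).toNat = 0 := by omega
      rw [h4, h5]
      simp
    · rw [if_neg h2]
      have h3 : (e - s).toNat = 0 := by omega
      have h5 : (s - e).toNat = 0 := by omega
      rw [h3, h5]
      simp
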